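-- pv_equiv track=rewrite | github.com/hide3tu/ocr-correction-pipeline | src/ocr_corrector/pipeline.py | _touches_protected_term
-- ===== SOURCE A (Python) =====
-- def _find_occurrences(text: str, needle: str) -> list[tuple[int, int]]:
--     if not text or not needle:
--         return []
--     spans: list[tuple[int, int]] = []
--     start = 0
--     while True:
--         idx = text.find(needle, start)
--         if idx < 0:
--             return spans
--         spans.append((idx, idx + len(needle)))
--         start = idx + 1
--
-- def _overlaps(lhs: tuple[int, int], rhs: tuple[int, int]) -> bool:
--     return lhs[0] < rhs[1] and rhs[0] < lhs[1]
--
-- def _touches_protected_term(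
--     line: str,
--     original: str,
--     protected_terms: tuple[str, ...],
-- ) -> bool:
--     if not line or not original or not protected_terms:
--         return False
--     if original in protected_terms:
--         return True
--
--     protected_spans: list[tuple[int, int]] = []
--     for term in protected_terms:
--         protected_spans.extend(_find_occurrences(line, term))
--     if not protected_spans:
--         return False
--
--     original_spans = _find_occurrences(line, original)
--     if not original_spans:
--         return False
--
--     overlapping = [
--         span for span in original_spans
--         if any(_overlaps(span, protected_span) for protected_span in protected_spans)
--     ]
--     return bool(overlapping) and len(overlapping) == len(original_spans)
-- ===== SOURCE B (Python) =====
-- def _touches_protected_term(line, original, protected_terms):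
--     # Position-coverage strategy: mark every line position covered by a
--     # protected-term occurrence, then require every occurrence of `original`
--     # to contain at least one covered position (early-exit on the first miss).
--     if not line or not original or not protected_terms:
--         return False
--     if original in protected_terms:
--         return True
--     covered = set()
--     for term in protected_terms:
--         if not term:
--             continue
--         idx = line.find(term)
--         while idx >= 0:
--             covered.update(range(idx, idx + len(term)))
--             idx = line.find(term, idx + 1)
--     if not covered:
--         return False
--     idx = line.find(original)
--     if idx < 0:
--         return False
--     while idx >= 0:
--         if not any(p in covered for p in range(idx, idx + len(original))):
--             return False
--         idx = line.find(original, idx + 1)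
--     return True
-- ===== Notes on version B (the rewrite author's own statement) =====
-- stated objective: alternative
-- what changed: A builds the full list of protected-term spans and tests every original-occurrence span against every protected span pairwise; B instead accumulates a set of covered line positions (one range-update per protected occurrence) and checks each original occurrence for a covered position, early-exiting on the first uncovered occurrence.
import Mathlib
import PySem

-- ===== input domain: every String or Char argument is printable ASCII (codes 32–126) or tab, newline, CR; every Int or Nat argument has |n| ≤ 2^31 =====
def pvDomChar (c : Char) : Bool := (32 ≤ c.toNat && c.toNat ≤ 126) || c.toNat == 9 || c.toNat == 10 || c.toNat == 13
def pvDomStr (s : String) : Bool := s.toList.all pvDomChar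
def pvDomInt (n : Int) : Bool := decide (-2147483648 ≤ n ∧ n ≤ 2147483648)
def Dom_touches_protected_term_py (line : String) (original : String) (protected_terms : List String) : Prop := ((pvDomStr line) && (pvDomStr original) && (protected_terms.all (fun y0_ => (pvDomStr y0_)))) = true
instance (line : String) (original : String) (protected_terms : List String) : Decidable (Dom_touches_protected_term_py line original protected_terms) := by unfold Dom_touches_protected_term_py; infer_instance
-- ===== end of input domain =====

-- B replaces A's span-list vs span-list pairwise overlap test by a covered-position
-- set: mark every line position inside a protected-term occurrence, then require each
-- occurrence of `original` to contain a covered position (alternative decomposition).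

-- termination fact for the find-loops: a successful find at start k lies at
-- index ≥ k and leaves room for the (nonempty) needle
theorem pvFind_bounds (text needle : List Char) (k : Nat) (hk : k ≤ text.length)
    (hn : needle ≠ []) (h : ¬ PySem.Chars.findFrom text needle (k : Int) none < 0) :
    k ≤ (PySem.Chars.findFrom text needle (k : Int) none).toNat ∧
      (PySem.Chars.findFrom text needle (k : Int) none).toNat + needle.length ≤ text.length := by
  have hne : PySem.Chars.findFrom text needle (k : Int) none ≠ -1 := by omega
  obtain ⟨h1, h2, -⟩ := PySem.Chars.findFrom_natCast_spec text needle k hk hne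
  have hlen := h2.length_le
  rw [List.length_drop] at hlen
  have : needle.length ≠ 0 := fun hz => hn (List.length_eq_zero_iff.mp hz)
  omega

-- ===== PORT A =====
-- the while-loop of _find_occurrences (spans accumulated; start strictly grows)
def pvFindOccLoop (text needle : List Char) (start : Nat) (spans : List (Int × Int)) :
    List (Int × Int) :=
  if hgd : start ≤ text.length ∧ needle ≠ [] then
    let idx := PySem.Chars.findFrom text needle (start : Int) none
    if h : idx < 0 then spans
    else pvFindOccLoop text needle (idx.toNat + 1) (spans ++ [(idx, idx + needle.length)])
  else spans
termination_by text.length + 1 - start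
decreasing_by
  obtain ⟨h1, h2⟩ := pvFind_bounds text needle start hgd.1 hgd.2 h
  have : needle.length ≠ 0 := fun hz => hgd.2 (List.length_eq_zero_iff.mp hz)
  omega

def pvFindOccurrences (text needle : List Char) : List (Int × Int) :=
  if text = [] ∨ needle = [] then [] else pvFindOccLoop text needle 0 []

def pvOverlaps (lhs rhs : Int × Int) : Bool :=
  decide (lhs.1 < rhs.2) && decide (rhs.1 < lhs.2)

def touches_protected_term_py (line : String) (original : String) (protected_terms : List String) : Bool :=
  if line.toList = [] ∨ original.toList = [] ∨ protected_terms = [] then false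
  else if protected_terms.contains original then true
  else
    let protSpans := protected_terms.foldl
      (fun acc term => acc ++ pvFindOccurrences line.toList term.toList) []
    if protSpans = [] then false
    else
      let origSpans := pvFindOccurrences line.toList original.toList
      if origSpans = [] then false
      else
        let overlapping := origSpans.filter
          (fun span => protSpans.any (fun ps => pvOverlaps span ps))
        (!overlapping.isEmpty) && (overlapping.length == origSpans.length)

-- ===== PORT B =====
-- 'covered.update(range(idx, idx + len(term)))' for each occurrence of term
def pvCoverLoop (text needle : List Char) (start : Nat) (covered : PySem.Set Int) :
    PySem.Set Int :=
  if hgd : start ≤ text.length ∧ needle ≠ [] then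
    let idx := PySem.Chars.findFrom text needle (start : Int) none
    if h : idx < 0 then covered
    else pvCoverLoop text needle (idx.toNat + 1)
      (PySem.Set.update covered (PySem.List.pyRange idx (idx + needle.length) 1))
  else covered
termination_by text.length + 1 - start
decreasing_by
  obtain ⟨h1, h2⟩ := pvFind_bounds text needle start hgd.1 hgd.2 h
  have : needle.length ≠ 0 := fun hz => hgd.2 (List.length_eq_zero_iff.mp hz)
  omega

-- 'while idx >= 0: if not any(p in covered for p in range(idx, idx+len)): return False'
def pvCheckLoop (text original : List Char) (covered : PySem.Set Int) (start : Nat) : Bool :=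
  if hgd : start ≤ text.length ∧ original ≠ [] then
    let idx := PySem.Chars.findFrom text original (start : Int) none
    if h : idx < 0 then true
    else if !(PySem.List.pyRange idx (idx + original.length) 1).any
        (fun p => PySem.Set.contains covered p) then false
    else pvCheckLoop text original covered (idx.toNat + 1)
  else true
termination_by text.length + 1 - start
decreasing_by
  obtain ⟨h1, h2⟩ := pvFind_bounds text original start hgd.1 hgd.2 h
  have : original.length ≠ 0 := fun hz => hgd.2 (List.length_eq_zero_iff.mp hz)
  omega

def touches_protected_term_py_alt (line : String) (original : String) (protected_terms : List String) : Bool :=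
  if line.toList = [] ∨ original.toList = [] ∨ protected_terms = [] then false
  else if protected_terms.contains original then true
  else
    let covered := protected_terms.foldl
      (fun cov term => pvCoverLoop line.toList term.toList 0 cov) []
    if covered = [] then false
    else if PySem.Chars.find line.toList original.toList < 0 then false
    else pvCheckLoop line.toList original.toList covered 0

-- ===== PRECONDITION & SPEC =====
def Spec_touches_protected_term_py (line : String) (original : String) (protected_terms : List String) (out : Bool) : Prop := out = touches_protected_term_py_alt line original protected_terms
instance (line : String) (original : String) (protected_terms : List String) (out : Bool) : Decidable (Spec_touches_protected_term_py line original protected_terms out) := by unfold Spec_touches_protected_term_py; infer_instance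

-- ===== CLAIM (what is proved, stated in full; the proofs are below) =====
def Claim_equal_touches_protected_term_py : Prop := ∀ (line : String) (original : String) (protected_terms : List String), Dom_touches_protected_term_py line original protected_terms → Spec_touches_protected_term_py line original protected_terms (touches_protected_term_py line original protected_terms)

-- ===== LEMMAS AND PROOFS =====

theorem pvFindOccLoop_acc (text needle : List Char) (start : Nat) (spans : List (Int × Int)) :
    ∀ a, pvFindOccLoop text needle start (a ++ spans) = a ++ pvFindOccLoop text needle start spans := by
  fun_induction pvFindOccLoop text needle start spans with
  | case1 start spans hgd idx hlt =>
    intro a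
    rw [pvFindOccLoop]
    simp only [dif_pos hgd]
    split
    · rfl
    · exact absurd hlt (by assumption)
  | case2 start spans hgd idx hlt ih =>
    intro a
    rw [pvFindOccLoop]
    simp only [dif_pos hgd]
    split
    · exact absurd (by assumption) hlt
    · rw [List.append_assoc]; exact ih a
  | case3 start spans hgd =>
    intro a
    rw [pvFindOccLoop]
    simp only [dif_neg hgd]

theorem pvFindOccLoop_append (text needle : List Char) (start : Nat) (spans : List (Int × Int)) :
    pvFindOccLoop text needle start spans = spans ++ pvFindOccLoop text needle start [] := by
  have := pvFindOccLoop_acc text needle start [] spans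
  simpa using this

theorem pvFindOccLoop_not_guard (text needle : List Char) (start : Nat) (spans : List (Int × Int))
    (h : ¬ (start ≤ text.length ∧ needle ≠ [])) :
    pvFindOccLoop text needle start spans = spans := by
  rw [pvFindOccLoop]; simp only [dif_neg h]

theorem pvFindOccLoop_nil (text needle : List Char) (start : Nat) (spans : List (Int × Int))
    (hgd : start ≤ text.length ∧ needle ≠ [])
    (hlt : PySem.Chars.findFrom text needle (start : Int) none < 0) :
    pvFindOccLoop text needle start spans = spans := by
  rw [pvFindOccLoop]; simp only [dif_pos hgd]
  split
  · rfl
  · exact absurd hlt (by assumption)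

theorem pvFindOccLoop_cons (text needle : List Char) (start : Nat)
    (hgd : start ≤ text.length ∧ needle ≠ [])
    (hge : ¬ PySem.Chars.findFrom text needle (start : Int) none < 0) :
    pvFindOccLoop text needle start [] =
      (PySem.Chars.findFrom text needle (start : Int) none,
        PySem.Chars.findFrom text needle (start : Int) none + (needle.length : Int)) ::
      pvFindOccLoop text needle ((PySem.Chars.findFrom text needle (start : Int) none).toNat + 1) [] := by
  rw [pvFindOccLoop]; simp only [dif_pos hgd]
  split
  · exact absurd (by assumption) hge
  · rw [pvFindOccLoop_append]; rfl

theorem pvFindOccLoop_shape (text needle : List Char) (start : Nat) (spans : List (Int × Int)) :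
    ∀ ab ∈ pvFindOccLoop text needle start spans,
      ab ∈ spans ∨ (0 ≤ ab.1 ∧ ab.2 = ab.1 + (needle.length : Int)) := by
  fun_induction pvFindOccLoop text needle start spans with
  | case1 start spans hgd idx hlt =>
    exact fun ab h => Or.inl h
  | case2 start spans hgd idx hlt ih =>
    intro ab hab
    rcases ih ab hab with h | h
    · rcases List.mem_append.mp h with h | h
      · exact Or.inl h
      · simp only [List.mem_singleton] at h
        subst h
        exact Or.inr ⟨by omega, rfl⟩
    · exact Or.inr h
  | case3 start spans hgd =>
    exact fun ab h => Or.inl h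

theorem mem_pvCoverLoop (text needle : List Char) (start : Nat) (cov : PySem.Set Int) (x : Int) :
    x ∈ pvCoverLoop text needle start cov ↔
      x ∈ cov ∨ ∃ ab ∈ pvFindOccLoop text needle start ([] : List (Int × Int)),
        ab.1 ≤ x ∧ x < ab.2 := by
  fun_induction pvCoverLoop text needle start cov with
  | case1 start cov hgd idx hlt =>
    rw [pvFindOccLoop_nil text needle start [] hgd hlt]
    simp
  | case2 start cov hgd idx hlt ih =>
    rw [pvFindOccLoop_cons text needle start hgd hlt]
    rw [ih]
    simp only [PySem.Set.mem_update, PySem.List.mem_pyRange_one, List.mem_cons]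
    constructor
    · rintro ((hc | hr) | ⟨ab, hab, h1, h2⟩)
      · exact Or.inl hc
      · exact Or.inr ⟨(idx, idx + (needle.length : Int)), Or.inl rfl, by simpa using hr⟩
      · exact Or.inr ⟨ab, Or.inr hab, h1, h2⟩
    · rintro (hc | ⟨ab, hab | hab, h1, h2⟩)
      · exact Or.inl (Or.inl hc)
      · subst hab; exact Or.inl (Or.inr ⟨h1, h2⟩)
      · exact Or.inr ⟨ab, hab, h1, h2⟩
  | case3 start cov hgd =>
    rw [pvFindOccLoop_not_guard text needle start [] hgd]
    simp

theorem pvCheckLoop_iff (text original : List Char) (covered : PySem.Set Int) (start : Nat) :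
    pvCheckLoop text original covered start = true ↔
      ∀ ab ∈ pvFindOccLoop text original start ([] : List (Int × Int)),
        ∃ p, ab.1 ≤ p ∧ p < ab.2 ∧ p ∈ covered := by
  fun_induction pvCheckLoop text original covered start with
  | case1 start hgd idx hlt =>
    rw [pvFindOccLoop_nil text original start [] hgd hlt]
    exact iff_of_true rfl (by simp)
  | case2 start hgd idx hlt hany =>
    rw [pvFindOccLoop_cons text original start hgd hlt]
    simp only [Bool.false_eq_true, false_iff]
    intro hall
    obtain ⟨p, h1, h2, h3⟩ := hall _ (List.mem_cons_self ..)
    simp only [Bool.not_eq_eq_eq_not, Bool.not_true, List.any_eq_false] at hany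
    exact absurd ((PySem.Set.contains_iff covered p).mpr h3)
      (by simpa using hany p (PySem.List.mem_pyRange_one.mpr ⟨h1, h2⟩))
  | case3 start hgd idx hlt hany ih =>
    rw [pvFindOccLoop_cons text original start hgd hlt]
    rw [ih]
    constructor
    · intro hrest ab hab
      rcases List.mem_cons.mp hab with h | h
      · subst h
        have hany' : (PySem.List.pyRange idx (idx + (original.length : Int)) 1).any
            (fun p => PySem.Set.contains covered p) = true := by
          cases h : (PySem.List.pyRange idx (idx + (original.length : Int)) 1).any
              (fun p => PySem.Set.contains covered p) with
          | true => rfl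
          | false => exact absurd (by rw [h]; rfl) hany
        obtain ⟨p, hp, hc⟩ := List.any_eq_true.mp hany'
        exact ⟨p, (PySem.List.mem_pyRange_one.mp hp).1, (PySem.List.mem_pyRange_one.mp hp).2,
          (PySem.Set.contains_iff covered p).mp hc⟩
      · exact hrest ab h
    · intro hall ab hab
      exact hall ab (List.mem_cons_of_mem _ hab)
  | case4 start hgd =>
    rw [pvFindOccLoop_not_guard text original start [] hgd]
    exact iff_of_true rfl (by simp)

-- pvFindOccurrences agrees with the bare loop in every case
theorem pvFindOccurrences_eq_loop (text needle : List Char) :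
    pvFindOccurrences text needle = pvFindOccLoop text needle 0 [] := by
  unfold pvFindOccurrences
  split
  · rename_i h
    rcases h with h | h
    · by_cases hn : needle = []
      · rw [pvFindOccLoop_not_guard]
        simp [hn]
      · subst h
        rw [pvFindOccLoop_nil]
        · exact ⟨by simp, hn⟩
        · have : PySem.Chars.findFrom ([] : List Char) needle ((0 : Nat) : Int) none = -1 := by
            rw [show (((0 : Nat) : Int)) = (0 : Int) by norm_num, PySem.Chars.findFrom_zero,
              PySem.Chars.find_eq_neg_one_iff]
            simp [hn]
          omega
    · rw [pvFindOccLoop_not_guard]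
      simp [h]
  · rfl

-- membership in the covered set accumulated over all protected terms
theorem mem_pvCoverFold (l : List Char) (pts : List String) (cov : PySem.Set Int) (x : Int) :
    x ∈ pts.foldl (fun cov term => pvCoverLoop l term.toList 0 cov) cov ↔
      x ∈ cov ∨ ∃ t ∈ pts, ∃ ab ∈ pvFindOccLoop l t.toList 0 ([] : List (Int × Int)),
        ab.1 ≤ x ∧ x < ab.2 := by
  induction pts generalizing cov with
  | nil => simp
  | cons t ts ih =>
    simp only [List.foldl_cons]
    rw [ih, mem_pvCoverLoop]
    constructor
    · rintro ((hc | ⟨ab, hab, h1, h2⟩) | ⟨t', ht', hab⟩)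
      · exact Or.inl hc
      · exact Or.inr ⟨t, List.mem_cons_self .., ab, hab, h1, h2⟩
      · exact Or.inr ⟨t', List.mem_cons_of_mem _ ht', hab⟩
    · rintro (hc | ⟨t', ht', ab, hab, h1, h2⟩)
      · exact Or.inl (Or.inl hc)
      · rcases List.mem_cons.mp ht' with h | h
        · subst h; exact Or.inl (Or.inr ⟨ab, hab, h1, h2⟩)
        · exact Or.inr ⟨t', h, ab, hab, h1, h2⟩

-- every span of a term's occurrence list is nonempty and starts at a nonneg index
theorem pvSpan_pos (l t : List Char) (ab : Int × Int)
    (h : ab ∈ pvFindOccLoop l t 0 ([] : List (Int × Int))) : 0 ≤ ab.1 ∧ ab.1 < ab.2 := by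
  by_cases ht : t = []
  · rw [pvFindOccLoop_not_guard] at h
    · simp at h
    · simp [ht]
  · rcases pvFindOccLoop_shape l t 0 [] ab h with h' | h'
    · simp at h'
    · have : t.length ≠ 0 := fun hz => ht (List.length_eq_zero_iff.mp hz)
      omega

-- ===== VERDICT (by name: the statement is the Claim_ definition above) =====
theorem touches_protected_term_py_spec : Claim_equal_touches_protected_term_py := by
  intro line original pts _
  unfold Spec_touches_protected_term_py touches_protected_term_py touches_protected_term_py_alt
  by_cases h0 : line.toList = [] ∨ original.toList = [] ∨ pts = []
  · simp only [if_pos h0]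
  · simp only [if_neg h0]
    by_cases hmem : pts.contains original
    · simp only [if_pos hmem]
    · simp only [if_neg hmem]
      have ho : original.toList ≠ [] := fun h => h0 (Or.inr (Or.inl h))
      -- shorthand
      set l := line.toList with hldef
      set o := original.toList with hodef
      set protSpans := pts.foldl (fun acc term => acc ++ pvFindOccurrences l term.toList) []
        with hPdef
      set covered := pts.foldl (fun cov term => pvCoverLoop l term.toList 0 cov) []
        with hCdef
      -- protSpans characterisation
      have hPmem : ∀ ab, ab ∈ protSpans ↔
          ∃ t ∈ pts, ab ∈ pvFindOccLoop l t.toList 0 ([] : List (Int × Int)) := by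
        intro ab
        rw [hPdef, PySem.List.foldl_append_eq_flatMap]
        simp only [List.nil_append, List.mem_flatMap]
        constructor
        · rintro ⟨t, ht, hab⟩
          exact ⟨t, ht, by rwa [pvFindOccurrences_eq_loop] at hab⟩
        · rintro ⟨t, ht, hab⟩
          exact ⟨t, ht, by rwa [pvFindOccurrences_eq_loop]⟩
      -- covered characterisation
      have hCmem : ∀ x, x ∈ covered ↔
          ∃ ab ∈ protSpans, ab.1 ≤ x ∧ x < ab.2 := by
        intro x
        rw [hCdef, mem_pvCoverFold]
        simp only [List.not_mem_nil, false_or]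
        constructor
        · rintro ⟨t, ht, ab, hab, h1, h2⟩
          exact ⟨ab, (hPmem ab).mpr ⟨t, ht, hab⟩, h1, h2⟩
        · rintro ⟨ab, hab, h1, h2⟩
          obtain ⟨t, ht, hab'⟩ := (hPmem ab).mp hab
          exact ⟨t, ht, ab, hab', h1, h2⟩
      -- emptiness of the two accumulations coincide
      have hempty : (covered = []) ↔ (protSpans = []) := by
        constructor
        · intro hC
          rcases hP : protSpans with _ | ⟨ab, rest⟩
          · rfl
          · exfalso
            have habP : ab ∈ protSpans := by rw [hP]; exact List.mem_cons_self ..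
            obtain ⟨t, ht, habL⟩ := (hPmem ab).mp habP
            have hpos := pvSpan_pos l t.toList ab habL
            have : ab.1 ∈ covered := (hCmem ab.1).mpr ⟨ab, habP, le_refl _, hpos.2⟩
            rw [hC] at this
            simp at this
        · intro hP
          rcases hC : covered with _ | ⟨x, rest⟩
          · rfl
          · exfalso
            have : x ∈ covered := by rw [hC]; exact List.mem_cons_self ..
            obtain ⟨ab, hab, -, -⟩ := (hCmem x).mp this
            rw [hP] at hab
            simp at hab
      by_cases hPnil : protSpans = []
      · rw [if_pos hPnil, if_pos (hempty.mpr hPnil)]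
      · rw [if_neg hPnil, if_neg (fun hC => hPnil (hempty.mp hC))]
        -- original spans and the guard find
        have hguard : (0 : Nat) ≤ l.length ∧ o ≠ [] := ⟨Nat.zero_le _, ho⟩
        have hfind0 : PySem.Chars.findFrom l o ((0 : Nat) : Int) none = PySem.Chars.find l o := by
          rw [show (((0 : Nat) : Int)) = (0 : Int) by norm_num, PySem.Chars.findFrom_zero]
        have hOrig : pvFindOccurrences l o = pvFindOccLoop l o 0 [] :=
          pvFindOccurrences_eq_loop l o
        by_cases hneg : PySem.Chars.find l o < 0
        · have : pvFindOccurrences l o = [] := by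
            rw [hOrig, pvFindOccLoop_nil l o 0 [] hguard (by rw [hfind0]; exact hneg)]
          rw [if_pos this, if_pos hneg]
        · have hne : pvFindOccurrences l o ≠ [] := by
            rw [hOrig, pvFindOccLoop_cons l o 0 hguard (by rw [hfind0]; exact hneg)]
            simp
          rw [if_neg hne, if_neg hneg]
          -- both residual values are decided by the same per-span condition
          rw [Bool.eq_iff_iff]
          have hlen : o.length ≠ 0 := fun hz => ho (List.length_eq_zero_iff.mp hz)
          have hspan : ∀ sp ∈ pvFindOccurrences l o,
              (protSpans.any (fun ps => pvOverlaps sp ps) = true ↔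
                ∃ p, sp.1 ≤ p ∧ p < sp.2 ∧ p ∈ covered) := by
            intro sp hsp
            rw [hOrig] at hsp
            have hsppos := pvSpan_pos l o sp hsp
            rw [List.any_eq_true]
            constructor
            · rintro ⟨ps, hps, hov⟩
              simp only [pvOverlaps, Bool.and_eq_true, decide_eq_true_eq] at hov
              obtain ⟨t, ht, hpsL⟩ := (hPmem ps).mp hps
              have hpspos := pvSpan_pos l t.toList ps hpsL
              refine ⟨max sp.1 ps.1, by omega, by omega, ?_⟩
              exact (hCmem _).mpr ⟨ps, hps, by omega, by omega⟩
            · rintro ⟨p, h1, h2, hpC⟩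
              obtain ⟨ps, hps, h3, h4⟩ := (hCmem p).mp hpC
              refine ⟨ps, hps, ?_⟩
              simp only [pvOverlaps, Bool.and_eq_true, decide_eq_true_eq]
              omega
          constructor
          · intro hA
            have hAlen := beq_iff_eq.mp ((Bool.and_eq_true _ _).mp hA).2
            have hall := List.length_filter_eq_length_iff.mp hAlen
            rw [pvCheckLoop_iff]
            intro ab hab
            have := (hspan ab (by rwa [hOrig])).mp (hall ab (by rwa [hOrig]))
            exact this
          · intro hB
            have hall : ∀ sp ∈ pvFindOccurrences l o,
                (protSpans.any (fun ps => pvOverlaps sp ps)) = true := by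
              intro sp hsp
              exact (hspan sp hsp).mpr ((pvCheckLoop_iff l o covered 0).mp hB sp
                (by rwa [hOrig] at hsp))
            have hfilter : (pvFindOccurrences l o).filter
                (fun span => protSpans.any (fun ps => pvOverlaps span ps)) =
                pvFindOccurrences l o := List.filter_eq_self.mpr hall
            rw [hfilter]
            simp [List.isEmpty_iff, hne]
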